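-- pv_equiv track=rewrite | github.com/kumarai/crazy-request-ai | backend/app/support/branch_executor.py | _strip_identifier_lines
-- ===== SOURCE A (Python) =====
-- def _strip_identifier_lines(block: str) -> str:
--     """Mirror of the orchestrator helper — strip qualified-name / URL
--     header lines the prompt_builder prepends to wiki-style chunks so
--     they don't leak into customer-facing replies."""
--     out: list[str] = []
--     for line in block.splitlines():
--         stripped = line.lstrip()
--         if stripped.startswith("### ") or stripped.startswith("> "):
--             continue
--         out.append(line)
--     while out and not out[0].strip():
--         out.pop(0)
--     return "\n".join(out)
-- ===== SOURCE B (Python) =====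
-- def _strip_identifier_lines(block: str) -> str:
--     """Single pass: skip header lines, and skip blank lines while nothing
--     has been kept yet; no separate front-trimming loop."""
--     out: list[str] = []
--     for line in block.splitlines():
--         s = line.lstrip()
--         if s.startswith("### ") or s.startswith("> "):
--             continue
--         if not out and not line.strip():
--             continue
--         out.append(line)
--     return "\n".join(out)
-- ===== Notes on version B (the rewrite author's own statement) =====
-- stated objective: simpler
-- what changed: Fused A's two phases (filter loop followed by a while/pop(0) front-trimming loop) into one pass whose accumulator's emptiness serves as a seen-content flag, dropping leading blanks inline.
import Mathlib
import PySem

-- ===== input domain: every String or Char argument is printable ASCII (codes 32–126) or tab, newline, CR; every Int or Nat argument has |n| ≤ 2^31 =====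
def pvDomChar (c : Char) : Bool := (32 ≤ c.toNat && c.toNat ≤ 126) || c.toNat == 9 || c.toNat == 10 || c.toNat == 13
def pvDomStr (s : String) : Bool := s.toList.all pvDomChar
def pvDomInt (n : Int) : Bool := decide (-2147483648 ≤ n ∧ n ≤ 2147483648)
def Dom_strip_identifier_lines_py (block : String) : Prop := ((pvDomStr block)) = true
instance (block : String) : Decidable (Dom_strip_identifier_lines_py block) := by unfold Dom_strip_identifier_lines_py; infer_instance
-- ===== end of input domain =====

-- B fuses A's filter loop and its separate while/pop(0) front-trimming loop into
-- one pass whose accumulator's emptiness acts as a seen-content flag (objective: simpler).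

-- line predicates shared by both sources: 'stripped.startswith("### ") or stripped.startswith("> ")'
-- and 'not line.strip()'
def pvHeader (line : String) : Bool :=
  let stripped := PySem.Str.lstrip line
  PySem.Str.startswith stripped "### " || PySem.Str.startswith stripped "> "
def pvBlank (line : String) : Bool := PySem.Str.strip line == ""

-- ===== PORT A =====
-- the 'while out and not out[0].strip(): out.pop(0)' loop, literally
def pvPopBlank (out : List String) : List String :=
  match out with
  | [] => []
  | l :: rest => if pvBlank l then pvPopBlank rest else l :: rest

def strip_identifier_lines_py (block : String) : String :=
  let out := (PySem.Str.splitlines block).foldl (fun out line =>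
    if pvHeader line then out
    else out ++ [line]) []
  PySem.Str.join "\n" (pvPopBlank out)

-- ===== PORT B =====
def strip_identifier_lines_py_alt (block : String) : String :=
  let out := (PySem.Str.splitlines block).foldl (fun out line =>
    if pvHeader line then out
    else if out.isEmpty && pvBlank line then out
    else out ++ [line]) []
  PySem.Str.join "\n" out

-- ===== PRECONDITION & SPEC =====
def Spec_strip_identifier_lines_py (block : String) (out : String) : Prop := out = strip_identifier_lines_py_alt block
instance (block : String) (out : String) : Decidable (Spec_strip_identifier_lines_py block out) := by unfold Spec_strip_identifier_lines_py; infer_instance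

-- ===== CLAIM (what is proved, stated in full; the proofs are below) =====
def Claim_equal_strip_identifier_lines_py : Prop := ∀ (block : String), Dom_strip_identifier_lines_py block → Spec_strip_identifier_lines_py block (strip_identifier_lines_py block)

-- ===== LEMMAS AND PROOFS =====

-- A's loop is a filter by 'not a header line'
theorem pv_foldA (ls : List String) (acc : List String) :
    ls.foldl (fun out line =>
      if pvHeader line then out
      else out ++ [line]) acc = acc ++ ls.filter (fun l => !pvHeader l) := by
  induction ls generalizing acc with
  | nil => simp
  | cons l rest ih =>
    simp only [List.foldl_cons, List.filter_cons]
    cases h : pvHeader l <;> simp [h, ih]  -- h/ih used in one branch each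

-- B's loop with a nonempty accumulator appends the filtered tail
theorem pv_foldB_ne (ls : List String) (acc : List String) (h : acc ≠ []) :
    ls.foldl (fun out line =>
      if pvHeader line then out
      else if out.isEmpty && pvBlank line then out
      else out ++ [line]) acc = acc ++ ls.filter (fun l => !pvHeader l) := by
  induction ls generalizing acc with
  | nil => simp
  | cons l rest ih =>
    cases hk : pvHeader l
    · have ih' := ih (acc ++ [l]) (by simp)
      simp [hk, h] at ih' ⊢
      exact ih'
    · have ih' := ih acc h
      simp [hk] at ih' ⊢
      exact ih'

-- B's loop from an empty accumulator = the filtered lines with front blanks popped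
theorem pv_foldB_nil (ls : List String) :
    ls.foldl (fun out line =>
      if pvHeader line then out
      else if out.isEmpty && pvBlank line then out
      else out ++ [line]) [] = pvPopBlank (ls.filter (fun l => !pvHeader l)) := by
  induction ls with
  | nil => simp [pvPopBlank]
  | cons l rest ih =>
    cases hk : pvHeader l
    · cases hb : pvBlank l
      · have h' := pv_foldB_ne rest [l] (by simp)
        simp [hk, hb, pvPopBlank] at h' ⊢
        exact h'
      · have ih' := ih
        simp [hk, hb, pvPopBlank] at ih' ⊢
        exact ih'
    · have ih' := ih
      simp [hk] at ih' ⊢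
      exact ih'

-- ===== VERDICT (by name: the statement is the Claim_ definition above) =====
theorem strip_identifier_lines_py_spec : Claim_equal_strip_identifier_lines_py := by
  intro block _
  unfold Spec_strip_identifier_lines_py strip_identifier_lines_py strip_identifier_lines_py_alt
  simp only [pv_foldA, pv_foldB_nil, List.nil_append]
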